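-- pv_equiv track=rewrite | github.com/cat2151/cat-github-watcher | src/gh_pr_phase_monitor/github/issue_etag_checker.py | _parse_issue_response
-- ===== SOURCE A (Python) =====
-- from typing import Any, Dict, List, Optional, Tuple
--
-- def _parse_issue_response(output: str) -> Tuple[bool, Optional[str]]:
--     """Parse gh api --include output into (is_304, etag).
--
--     Args:
--         output: Raw stdout from ``gh api --include``.
--
--     Returns:
--         is_304: True when the server returned 304 Not Modified.
--         etag:   The ETag value from response headers, or None if absent.
--     """
--     lines = output.split("\n")
--     if not lines:
--         return False, None
--
--     # The first line is the HTTP status line, e.g. "HTTP/2 200" or "HTTP/2 304"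
--     first_line = lines[0].strip()
--     if "304" in first_line:
--         return True, None
--
--     found_etag: Optional[str] = None
--     in_headers = True
--
--     for line in lines[1:]:
--         if in_headers:
--             stripped = line.strip()
--             if not stripped:
--                 # Empty line separates HTTP headers from the response body
--                 in_headers = False
--                 continue
--             lower = stripped.lower()
--             if lower.startswith("etag:"):
--                 found_etag = stripped.split(":", 1)[1].strip()
--
--     return False, found_etag
-- ===== SOURCE B (Python) =====
-- def _parse_issue_response(output):
--     lines = output.split("\n")
--     if "304" in lines[0].strip():
--         return True, None
--     rest = lines[1:]
--     boundary = next((i for i, l in enumerate(rest) if not l.strip()), len(rest))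
--     for line in reversed(rest[:boundary]):
--         stripped = line.strip()
--         if stripped.lower().startswith("etag:"):
--             return False, stripped.split(":", 1)[1].strip()
--     return False, None
-- ===== Notes on version B (the rewrite author's own statement) =====
-- stated objective: simpler
-- what changed: Replaces A's single flag-interleaved forward pass with a two-phase decomposition: first compute the header boundary (first blank line), then scan only the header slice in reverse and return at the first ETag match (last-wins), with early returns instead of loop state.
import Mathlib
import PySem

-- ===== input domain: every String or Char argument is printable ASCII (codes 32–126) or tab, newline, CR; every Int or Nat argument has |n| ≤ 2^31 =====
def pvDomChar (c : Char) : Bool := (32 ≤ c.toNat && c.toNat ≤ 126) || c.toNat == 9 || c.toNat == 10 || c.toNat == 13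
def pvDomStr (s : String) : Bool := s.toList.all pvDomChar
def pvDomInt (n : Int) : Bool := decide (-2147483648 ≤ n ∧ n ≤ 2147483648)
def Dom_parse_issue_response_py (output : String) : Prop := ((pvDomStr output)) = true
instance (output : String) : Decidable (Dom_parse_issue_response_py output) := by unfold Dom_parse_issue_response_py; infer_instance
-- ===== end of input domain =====

-- B replaces A's flag-interleaved single pass by a two-phase decomposition (find the
-- header boundary, then reverse-scan the header slice with early return); objective: simpler.

-- ===== PORT A =====
-- output.split("\n") is ported as (split? output "\n").getD []: sep ≠ "" so split? is always some.
-- A-side helper: the body of A's for-loop (state = (found_etag, in_headers)).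
def pvAStep (st : Option String × Bool) (line : String) : Option String × Bool :=
  if st.2 then
    let stripped := PySem.Str.strip line
    if stripped = "" then (st.1, false)
    else
      let lower := PySem.Str.lower stripped
      if PySem.Str.startswith lower "etag:" then
        -- stripped.split(":", 1)[1]: here ':' occurs in stripped, so index 1 exists ('.getD ""' is never taken)
        (some (PySem.Str.strip ((PySem.List.pyGet? ((PySem.Str.splitMax? stripped ":" 1).getD []) 1).getD "")), st.2)
      else st
  else st

def parse_issue_response_py (output : String) : Bool × Option String :=
  let lines := (PySem.Str.split? output "\n").getD []
  match lines with
  | [] => (false, none)  -- Python's `if not lines` guard (split never returns an empty list)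
  | first :: rest =>
    let first_line := PySem.Str.strip first
    if PySem.Str.isIn "304" first_line then (true, none)
    else
      let st := rest.foldl pvAStep (none, true)
      (false, st.1)

-- ===== PORT B =====
-- B-side helper: value of an ETag header line, none if the line is not one.
def pvBEtag (line : String) : Option String :=
  let stripped := PySem.Str.strip line
  if PySem.Str.startswith (PySem.Str.lower stripped) "etag:" then
    some (PySem.Str.strip ((PySem.List.pyGet? ((PySem.Str.splitMax? stripped ":" 1).getD []) 1).getD ""))
  else none

def parse_issue_response_py_alt (output : String) : Bool × Option String :=
  let lines := (PySem.Str.split? output "\n").getD []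
  if PySem.Str.isIn "304" (PySem.Str.strip (lines.headD "")) then (true, none)
  else
    let rest := lines.drop 1
    let boundary := (rest.findIdx? (fun l => PySem.Str.strip l == "")).getD rest.length
    (false, (rest.take boundary).reverse.findSome? pvBEtag)

-- ===== PRECONDITION & SPEC =====
def Spec_parse_issue_response_py (output : String) (out : Bool × Option String) : Prop := out = parse_issue_response_py_alt output
instance (output : String) (out : Bool × Option String) : Decidable (Spec_parse_issue_response_py output out) := by unfold Spec_parse_issue_response_py; infer_instance

-- ===== CLAIM (what is proved, stated in full; the proofs are below) =====
def Claim_equal_parse_issue_response_py : Prop := ∀ (output : String), Dom_parse_issue_response_py output → Spec_parse_issue_response_py output (parse_issue_response_py output)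

-- ===== LEMMAS AND PROOFS =====

-- Once in_headers is false, A's loop never changes the state.
theorem pvFold_false (rest : List String) (found : Option String) :
    rest.foldl pvAStep (found, false) = (found, false) := by
  induction rest with
  | nil => rfl
  | cons l t ih => simpa [pvAStep] using ih

theorem pvStep_blank (found : Option String) (l : String) (hb : PySem.Str.strip l = "") :
    pvAStep (found, true) l = (found, false) := by
  simp only [pvAStep, hb]; rfl

theorem pvStep_etag (found : Option String) (l : String) (hb : ¬ PySem.Str.strip l = "")
    (he : PySem.Str.startswith (PySem.Str.lower (PySem.Str.strip l)) "etag:" = true) :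
    pvAStep (found, true) l = (pvBEtag l, true) := by
  simp only [pvAStep, pvBEtag, hb, he]; rfl

theorem pvStep_other (found : Option String) (l : String) (hb : ¬ PySem.Str.strip l = "")
    (he : ¬ PySem.Str.startswith (PySem.Str.lower (PySem.Str.strip l)) "etag:" = true) :
    pvAStep (found, true) l = (found, true) := by
  simp only [pvAStep, hb, he]; rfl

theorem pvFold_true (rest : List String) (found : Option String) :
    (rest.foldl pvAStep (found, true)).1 =
      (((rest.take ((rest.findIdx? (fun l => PySem.Str.strip l == "")).getD rest.length)).reverse.findSome? pvBEtag).or found) := by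
  induction rest generalizing found with
  | nil => simp
  | cons l t ih =>
    by_cases hb : PySem.Str.strip l = ""
    · have hb' : (PySem.Str.strip l == "") = true := by simpa using hb
      rw [List.foldl_cons, pvStep_blank found l hb, pvFold_false]
      simp [List.findIdx?_cons, hb']
    · have hb' : (PySem.Str.strip l == "") = false := by simpa using hb
      have hidx : (((l :: t).findIdx? (fun l => PySem.Str.strip l == "")).getD (l :: t).length)
          = ((t.findIdx? (fun l => PySem.Str.strip l == "")).getD t.length) + 1 := by
        simp only [List.findIdx?_cons, hb', List.length_cons]
        cases h : t.findIdx? (fun l => PySem.Str.strip l == "") <;> simp [h]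
      rw [hidx, List.take_succ_cons, List.reverse_cons, List.findSome?_append]
      by_cases he : PySem.Str.startswith (PySem.Str.lower (PySem.Str.strip l)) "etag:" = true
      · rw [List.foldl_cons, pvStep_etag found l hb he, ih]
        have hv : ∃ v, pvBEtag l = some v := by
          rw [pvBEtag]; simp only [he, if_true]; exact ⟨_, rfl⟩
        obtain ⟨v, hv⟩ := hv
        cases h2 : (t.take ((t.findIdx? (fun l => PySem.Str.strip l == "")).getD t.length)).reverse.findSome? pvBEtag <;>
          simp [h2, hv, Option.or]
      · rw [List.foldl_cons, pvStep_other found l hb he, ih]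
        have hv : pvBEtag l = none := by
          rw [pvBEtag]; simp only [he]; rfl
        cases h2 : (t.take ((t.findIdx? (fun l => PySem.Str.strip l == "")).getD t.length)).reverse.findSome? pvBEtag <;>
          simp [h2, hv, Option.or]

theorem parse_issue_response_py_spec : Claim_equal_parse_issue_response_py := by
  intro output _
  unfold Spec_parse_issue_response_py parse_issue_response_py parse_issue_response_py_alt
  cases hsplit : (PySem.Str.split? output "\n").getD [] with
  | nil => simp; decide
  | cons first rest =>
    by_cases h304 : PySem.Str.isIn "304" (PySem.Str.strip first) = true
    · have h' : PySem.Chars.isIn ['3','0','4'] (PySem.Chars.strip first.toList) = true := by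
        simpa using h304
      simp [h']
    · have h' : PySem.Chars.isIn ['3','0','4'] (PySem.Chars.strip first.toList) = false := by
        simpa using h304
      simp only [List.headD_cons, List.drop_succ_cons, List.drop_zero]
      rw [pvFold_true rest none]
      cases h2 : (rest.take ((rest.findIdx? (fun l => PySem.Str.strip l == "")).getD rest.length)).reverse.findSome? pvBEtag <;>
        simp [h', h2, Option.or]
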